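-- pv_equiv track=rewrite | github.com/xlisp/learn-langgraph | langgraph_shell_en.py | _parse_reasoning_response
-- ===== SOURCE A (Python) =====
-- def _parse_reasoning_response(response: str) -> tuple:
--     """Parse reasoning response"""
--     lines = response.strip().split('\n')
--     thought = ""
--     action = ""
--     action_input = ""
--
--     for line in lines:
--         if line.startswith("Thought:"):
--             thought = line.replace("Thought:", "").strip()
--         elif line.startswith("Action:"):
--             action = line.replace("Action:", "").strip()
--         elif line.startswith("Action Input:"):
--             action_input = line.replace("Action Input:", "").strip()
--
--     return thought, action, action_input
-- ===== SOURCE B (Python) =====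
-- def _last_field(lines, prefix):
--     for line in reversed(lines):
--         if line.startswith(prefix):
--             return line.replace(prefix, "").strip()
--     return ""
--
-- def _parse_reasoning_response(response: str) -> tuple:
--     lines = response.strip().split('\n')
--     return (_last_field(lines, "Thought:"),
--             _last_field(lines, "Action:"),
--             _last_field(lines, "Action Input:"))
-- ===== Notes on version B (the rewrite author's own statement) =====
-- stated objective: alternative
-- what changed: Replaced the single stateful loop carrying three accumulators by three independent reverse scans, each returning the last line with its prefix (last-match-wins made explicit).
import Mathlib
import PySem

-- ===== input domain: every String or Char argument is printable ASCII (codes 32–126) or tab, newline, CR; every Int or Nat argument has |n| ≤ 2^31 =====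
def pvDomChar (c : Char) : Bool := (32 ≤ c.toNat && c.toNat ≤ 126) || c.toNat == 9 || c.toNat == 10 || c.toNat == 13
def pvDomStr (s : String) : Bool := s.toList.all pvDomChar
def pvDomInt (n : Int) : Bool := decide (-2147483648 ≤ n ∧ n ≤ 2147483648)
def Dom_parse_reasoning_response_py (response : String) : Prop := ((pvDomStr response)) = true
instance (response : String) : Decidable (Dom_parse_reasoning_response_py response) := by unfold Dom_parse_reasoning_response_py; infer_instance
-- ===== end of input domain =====

-- B replaces A's single stateful loop carrying three accumulators with three independent reverse scans (last matching line per prefix); same return value, no side effects.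

-- ===== PORT A =====
-- A's loop step: branch order and updates exactly as in the Python for-loop.
def pvAStep (st : String × String × String) (line : String) : String × String × String :=
  if PySem.Str.startswith line "Thought:" then
    (PySem.Str.strip (PySem.Str.replace line "Thought:" ""), st.2.1, st.2.2)
  else if PySem.Str.startswith line "Action:" then
    (st.1, PySem.Str.strip (PySem.Str.replace line "Action:" ""), st.2.2)
  else if PySem.Str.startswith line "Action Input:" then
    (st.1, st.2.1, PySem.Str.strip (PySem.Str.replace line "Action Input:" ""))
  else st

def parse_reasoning_response_py (response : String) : String × String × String :=
  let lines := (PySem.Str.split? (PySem.Str.strip response) "\n").getD []  -- sep "\n" ≠ "", so split? is always some; getD is a totality guard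
  lines.foldl pvAStep ("", "", "")

-- ===== PORT B =====
-- B's helper: first hit while walking the reversed line list, else "".
def pvLastField (lines : List String) (pre : String) : String :=
  match lines with
  | [] => ""
  | line :: rest =>
    if PySem.Str.startswith line pre then PySem.Str.strip (PySem.Str.replace line pre "")
    else pvLastField rest pre

def parse_reasoning_response_py_alt (response : String) : String × String × String :=
  let lines := (PySem.Str.split? (PySem.Str.strip response) "\n").getD []  -- sep "\n" ≠ "", so split? is always some; getD is a totality guard
  (pvLastField lines.reverse "Thought:",
   pvLastField lines.reverse "Action:",
   pvLastField lines.reverse "Action Input:")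

-- ===== PRECONDITION & SPEC =====
def Spec_parse_reasoning_response_py (response : String) (out : String × String × String) : Prop := out = parse_reasoning_response_py_alt response
instance (response : String) (out : String × String × String) : Decidable (Spec_parse_reasoning_response_py response out) := by unfold Spec_parse_reasoning_response_py; infer_instance

-- ===== CLAIM (what is proved, stated in full; the proofs are below) =====
def Claim_equal_parse_reasoning_response_py : Prop := ∀ (response : String), Dom_parse_reasoning_response_py response → Spec_parse_reasoning_response_py response (parse_reasoning_response_py response)

-- ===== LEMMAS AND PROOFS =====

-- pvLastField with an explicit default (proof-only generalisation of B's helper)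
def pvLastFieldD (lines : List String) (pre : String) (d : String) : String :=
  match lines with
  | [] => d
  | line :: rest =>
    if PySem.Str.startswith line pre then PySem.Str.strip (PySem.Str.replace line pre "")
    else pvLastFieldD rest pre d

-- two of the three prefixes can never both head the same line
theorem pvPrefDisj (l p q : String)
    (hne : ¬ (p.toList <+: q.toList ∨ q.toList <+: p.toList))
    (h1 : PySem.Str.startswith l p = true) (h2 : PySem.Str.startswith l q = true) : False := by
  rw [PySem.Str.startswith_eq, PySem.Chars.startswith_iff] at h1 h2
  exact hne (List.prefix_or_prefix_of_prefix h1 h2)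

theorem pvTA (l : String) (h1 : PySem.Str.startswith l "Thought:" = true)
    (h2 : PySem.Str.startswith l "Action:" = true) : False :=
  pvPrefDisj l _ _ (by decide) h1 h2

theorem pvTAI (l : String) (h1 : PySem.Str.startswith l "Thought:" = true)
    (h2 : PySem.Str.startswith l "Action Input:" = true) : False :=
  pvPrefDisj l _ _ (by decide) h1 h2

theorem pvAAI (l : String) (h1 : PySem.Str.startswith l "Action:" = true)
    (h2 : PySem.Str.startswith l "Action Input:" = true) : False :=
  pvPrefDisj l _ _ (by decide) h1 h2

theorem foldl_fst (lines : List String) (st : String × String × String) :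
    (lines.foldl pvAStep st).1 = pvLastFieldD lines.reverse "Thought:" st.1 := by
  induction lines using List.reverseRecOn generalizing st with
  | nil => simp [pvLastFieldD]
  | append_singleton xs l ih =>
    simp only [List.foldl_append, List.foldl_cons, List.foldl_nil, List.reverse_append,
      List.reverse_singleton, List.singleton_append, pvLastFieldD, pvAStep]
    split_ifs with h1 h2 h3 <;> simp [ih]

theorem foldl_snd (lines : List String) (st : String × String × String) :
    (lines.foldl pvAStep st).2.1 = pvLastFieldD lines.reverse "Action:" st.2.1 := by
  induction lines using List.reverseRecOn generalizing st with
  | nil => simp [pvLastFieldD]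
  | append_singleton xs l ih =>
    simp only [List.foldl_append, List.foldl_cons, List.foldl_nil, List.reverse_append,
      List.reverse_singleton, List.singleton_append, pvLastFieldD, pvAStep]
    split_ifs with h1 h2 h3 <;> first
      | exact (pvTA l h1 h2).elim
      | simp [ih]

theorem foldl_trd (lines : List String) (st : String × String × String) :
    (lines.foldl pvAStep st).2.2 = pvLastFieldD lines.reverse "Action Input:" st.2.2 := by
  induction lines using List.reverseRecOn generalizing st with
  | nil => simp [pvLastFieldD]
  | append_singleton xs l ih =>
    simp only [List.foldl_append, List.foldl_cons, List.foldl_nil, List.reverse_append,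
      List.reverse_singleton, List.singleton_append, pvLastFieldD, pvAStep]
    split_ifs with h1 h2 h3 h4 h5 <;> first
      | exact (pvTAI l h1 h2).elim
      | exact (pvAAI l h3 h4).elim
      | simp [ih]

theorem pvLastField_eq_D (lines : List String) (pre : String) :
    pvLastField lines pre = pvLastFieldD lines pre "" := by
  induction lines with
  | nil => rfl
  | cons l r ih => simp only [pvLastField, pvLastFieldD, ih]

-- ===== VERDICT (by name: the statement is the Claim_ definition above) =====
theorem parse_reasoning_response_py_spec : Claim_equal_parse_reasoning_response_py := by
  intro response _
  unfold Spec_parse_reasoning_response_py parse_reasoning_response_py parse_reasoning_response_py_alt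
  refine Prod.ext ?_ (Prod.ext ?_ ?_) <;>
    simp [foldl_fst, foldl_snd, foldl_trd, pvLastField_eq_D]
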